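-- pv_equiv track=rewrite | github.com/sh4dow18/SU | Sh4dow18_Utilities.py | id_formatting
-- ===== SOURCE A (Python) =====
-- def id_formatting(ID):
-- 	new_ID = ""
-- 	ID_Lenght = len(ID)
-- 	if ID_Lenght == 11 or ID_Lenght == 9 or ID_Lenght == 7:
-- 		for i in range(0, ID_Lenght):
-- 			new_ID = new_ID + ID[i]
-- 			if (ID_Lenght == 11) and (new_ID[i] == ' '):
-- 				new_ID = new_ID[0:len(new_ID) - 1:1]
-- 				new_ID = new_ID + '-'
-- 			elif ID_Lenght == 9 and (i == 0 or i == 4):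
-- 				new_ID = new_ID + '-'
-- 			elif ID_Lenght == 7 and (i == 0 or i == 3):
-- 				new_ID = new_ID + '-'
-- 				new_ID = new_ID + '0'
-- 	return new_ID
-- ===== SOURCE B (Python) =====
-- def id_formatting(ID):
-- 	n = len(ID)
-- 	if n == 11:
-- 		return ''.join('-' if c == ' ' else c for c in ID)
-- 	if n == 9:
-- 		return ID[0:1] + '-' + ID[1:5] + '-' + ID[5:9]
-- 	if n == 7:
-- 		return ID[0:1] + '-0' + ID[1:4] + '-0' + ID[4:7]
-- 	return ""
-- ===== Notes on version B (the rewrite author's own statement) =====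
-- stated objective: simpler
-- what changed: Replaced A's stateful character-by-character loop (growing accumulator with per-step dash insertion and delete-last-then-dash for spaces) by closed-form construction: direct slice concatenation for lengths 9 and 7 and a single space-to-dash substitution for length 11.
import Mathlib
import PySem

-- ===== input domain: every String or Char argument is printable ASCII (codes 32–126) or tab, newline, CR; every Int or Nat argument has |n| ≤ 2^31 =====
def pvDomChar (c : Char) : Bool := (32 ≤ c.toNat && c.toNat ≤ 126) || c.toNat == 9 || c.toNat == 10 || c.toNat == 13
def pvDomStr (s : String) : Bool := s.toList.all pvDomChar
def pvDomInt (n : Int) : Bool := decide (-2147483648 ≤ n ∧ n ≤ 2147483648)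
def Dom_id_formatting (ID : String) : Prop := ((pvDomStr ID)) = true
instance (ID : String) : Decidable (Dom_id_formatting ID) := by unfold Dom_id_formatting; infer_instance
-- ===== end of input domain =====

-- B replaces A's stateful character-by-character loop with closed-form slice concatenation
-- (lengths 9/7) and a direct space→dash substitution (length 11); objective: simpler.

-- ===== PORT A =====
-- literal port of A's index loop with the growing accumulator string new_ID
def id_formatting (ID : String) : String :=
  let cs := ID.toList
  let n : Int := (cs.length : Int)
  if n = 11 ∨ n = 9 ∨ n = 7 then
    String.ofList ((PySem.List.pyRange 0 n 1).foldl (fun newID i =>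
      let newID2 := newID ++ [PySem.List.pyGetD cs i ' ']   -- new_ID = new_ID + ID[i] (index always in range here)
      if n = 11 ∧ PySem.List.pyGetD newID2 i ' ' = ' ' then
        PySem.List.slice newID2 (some 0) (some ((newID2.length : Int) - 1)) ++ ['-']
      else if n = 9 ∧ (i = 0 ∨ i = 4) then newID2 ++ ['-']
      else if n = 7 ∧ (i = 0 ∨ i = 3) then (newID2 ++ ['-']) ++ ['0']
      else newID2) [])
  else ""

-- ===== PORT B =====
def id_formatting_alt (ID : String) : String :=
  let cs := ID.toList
  if cs.length = 11 then
    String.ofList (cs.map (fun c => if c = ' ' then '-' else c))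
  else if cs.length = 9 then
    String.ofList (PySem.List.slice cs (some 0) (some 1) ++ '-' ::
      (PySem.List.slice cs (some 1) (some 5) ++ '-' :: PySem.List.slice cs (some 5) (some 9)))
  else if cs.length = 7 then
    String.ofList (PySem.List.slice cs (some 0) (some 1) ++ '-' :: '0' ::
      (PySem.List.slice cs (some 1) (some 4) ++ '-' :: '0' :: PySem.List.slice cs (some 4) (some 7)))
  else ""

-- ===== PRECONDITION & SPEC =====
def Spec_id_formatting (ID : String) (out : String) : Prop := out = id_formatting_alt ID
instance (ID : String) (out : String) : Decidable (Spec_id_formatting ID out) := by unfold Spec_id_formatting; infer_instance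

-- ===== CLAIM (what is proved, stated in full; the proofs are below) =====
def Claim_equal_id_formatting : Prop := ∀ (ID : String), Dom_id_formatting ID → Spec_id_formatting ID (id_formatting ID)

-- ===== LEMMAS AND PROOFS =====

-- the character substitution A's length-11 loop performs
def pvSDash (c : Char) : Char := if c = ' ' then '-' else c

-- invariant of A's length-11 loop: the accumulator is the substituted prefix
theorem pv_loop11 (cs : List Char) :
    ∀ (m k : Nat) (acc : List Char), cs.length - k = m → k ≤ cs.length →
    acc = (cs.take k).map pvSDash →
    (PySem.List.pyRange (k : Int) (cs.length : Int) 1).foldl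
      (fun newID i =>
        let newID2 := newID ++ [PySem.List.pyGetD cs i ' ']
        if PySem.List.pyGetD newID2 i ' ' = ' ' then
          PySem.List.slice newID2 (some 0) (some ((newID2.length : Int) - 1)) ++ ['-']
        else newID2) acc
    = cs.map pvSDash := by
  intro m
  induction m with
  | zero =>
    intro k acc hm hk hacc
    have hk' : k = cs.length := by omega
    subst hk'
    rw [PySem.List.pyRange_one_eq_nil (le_refl _)]
    simp [hacc]
  | succ m ih =>
    intro k acc hm hk hacc
    have hlt : k < cs.length := by omega
    have hlen : acc.length = k := by simp [hacc, Nat.min_eq_left (Nat.le_of_lt hlt)]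
    have hget : PySem.List.pyGetD cs (k : Int) ' ' = cs[k] := by
      simp [PySem.List.pyGetD_natCast, List.getD_eq_getElem?_getD, List.getElem?_eq_getElem hlt]
    have hget2 : PySem.List.pyGetD (acc ++ [cs[k]]) (k : Int) ' ' = cs[k] := by
      simp [PySem.List.pyGetD_natCast, List.getD_eq_getElem?_getD, ← hlen]
    have hslice : PySem.List.slice (acc ++ [cs[k]]) (some 0)
        (some (((acc ++ [cs[k]]).length : Int) - 1)) = acc := by
      have h1 : (((acc ++ [cs[k]]).length : Int) - 1) = ((k : Nat) : Int) := by
        simp [hlen]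
      rw [h1]
      have h2 := PySem.List.slice_natCast (acc ++ [cs[k]]) 0 k
      rw [Nat.cast_zero] at h2
      rw [h2]
      simp [List.take_left' hlen]
    have htake : (cs.take (k + 1)).map pvSDash
        = (cs.take k).map pvSDash ++ [pvSDash cs[k]] := by
      have h' : (List.map pvSDash cs)[k]? = some (pvSDash cs[k]) := by
        rw [List.getElem?_map, List.getElem?_eq_getElem hlt]
        rfl
      rw [List.map_take, List.map_take, List.take_add_one, h']
      rfl
    have hstep : (let newID2 := acc ++ [PySem.List.pyGetD cs (k : Int) ' ']
        if PySem.List.pyGetD newID2 (k : Int) ' ' = ' ' then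
          PySem.List.slice newID2 (some 0) (some ((newID2.length : Int) - 1)) ++ ['-']
        else newID2) = (cs.take (k + 1)).map pvSDash := by
      rw [show (let newID2 := acc ++ [PySem.List.pyGetD cs (k : Int) ' ']
        if PySem.List.pyGetD newID2 (k : Int) ' ' = ' ' then
          PySem.List.slice newID2 (some 0) (some ((newID2.length : Int) - 1)) ++ ['-']
        else newID2) = (if PySem.List.pyGetD (acc ++ [cs[k]]) (k : Int) ' ' = ' ' then
          PySem.List.slice (acc ++ [cs[k]]) (some 0)
            (some (((acc ++ [cs[k]]).length : Int) - 1)) ++ ['-']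
        else acc ++ [cs[k]]) from by rw [hget]]
      rw [hget2, htake, hacc.symm]
      by_cases hsp : cs[k] = ' '
      · rw [if_pos hsp, hslice, hsp]
        simp [pvSDash]
      · rw [if_neg hsp]
        simp [pvSDash, hsp]
    rw [PySem.List.pyRange_one_cons (by exact_mod_cast hlt), List.foldl_cons, hstep,
      show ((k : Int) + 1) = ((k + 1 : Nat) : Int) by push_cast; ring]
    exact ih (k + 1) _ (by omega) (by omega) rfl

theorem id_formatting_key (cs : List Char) :
    id_formatting (String.ofList cs) = id_formatting_alt (String.ofList cs) := by
  by_cases h11 : cs.length = 11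
  · simp only [id_formatting, id_formatting_alt, String.toList_ofList, h11]
    have key := pv_loop11 cs cs.length 0 [] (by omega) (by omega) (by simp)
    rw [h11] at key
    norm_num [-String.ofList_append] at key ⊢
    rw [key]
    rfl
  · by_cases h9 : cs.length = 9
    · obtain ⟨c0, c1, c2, c3, c4, c5, c6, c7, c8, rfl⟩ :
        ∃ c0 c1 c2 c3 c4 c5 c6 c7 c8, cs = [c0, c1, c2, c3, c4, c5, c6, c7, c8] := by
        match cs, h9 with
        | [a0,a1,a2,a3,a4,a5,a6,a7,a8], _ => exact ⟨_,_,_,_,_,_,_,_,_, rfl⟩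
      simp only [id_formatting, id_formatting_alt, String.toList_ofList]
      norm_num [-String.ofList_append]
      congr 1
    · by_cases h7 : cs.length = 7
      · obtain ⟨c0, c1, c2, c3, c4, c5, c6, rfl⟩ :
          ∃ c0 c1 c2 c3 c4 c5 c6, cs = [c0, c1, c2, c3, c4, c5, c6] := by
          match cs, h7 with
          | [a0,a1,a2,a3,a4,a5,a6], _ => exact ⟨_,_,_,_,_,_,_, rfl⟩
        simp only [id_formatting, id_formatting_alt, String.toList_ofList]
        norm_num [-String.ofList_append]
        congr 1
      · simp only [id_formatting, id_formatting_alt, String.toList_ofList]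
        rw [if_neg, if_neg h11, if_neg h9, if_neg h7]
        omega

-- ===== VERDICT (by name: the statement is the Claim_ definition above) =====
theorem id_formatting_spec : Claim_equal_id_formatting := by
  intro ID _
  show id_formatting ID = id_formatting_alt ID
  have h := id_formatting_key ID.toList
  rwa [String.ofList_toList] at h
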